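-- pv_equiv track=rewrite | github.com/narunraman/quickscope | quickscope/simulation/default/response_handler.py | _find_boxed_spans
-- ===== SOURCE A (Python) =====
-- def _find_boxed_spans(text: str) -> list[tuple[int, int, str]]:
--     """
--     Find all \\boxed{...} spans with nested-brace support.
--     Returns (start, end, content) where start/end are content indices.
--     """
--     results = []
--     token = "\\boxed{"
--     i = 0
--     while True:
--         start = text.find(token, i)
--         if start == -1:
--             break
--         j = start + len(token)
--         depth = 1
--         k = j
--         while k < len(text) and depth > 0:
--             char = text[k]
--             if char == "{":
--                 depth += 1
--             elif char == "}":
--                 depth -= 1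
--             k += 1
--         if depth == 0:
--             end = k - 1
--             content = text[j:end]
--             results.append((j, end, content))
--             i = k
--         else:
--             break
--     return results
-- ===== SOURCE B (Python) =====
-- def _find_boxed_spans(text: str) -> list[tuple[int, int, str]]:
--     """Single linear pass with a depth counter instead of repeated find + inner scan."""
--     results = []
--     token = "\\boxed{"
--     n = len(text)
--     i = 0
--     depth = 0
--     start = 0
--     while i < n:
--         if depth == 0:
--             if text.startswith(token, i):
--                 start = i + len(token)
--                 i = start
--                 depth = 1
--             else:
--                 i += 1
--         else:
--             ch = text[i]
--             if ch == "{":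
--                 depth += 1
--             elif ch == "}":
--                 depth -= 1
--                 if depth == 0:
--                     results.append((start, i, text[start:i]))
--             i += 1
--     return results
-- ===== Notes on version B (the rewrite author's own statement) =====
-- stated objective: alternative
-- what changed: Replaces the outer find()-loop with a nested brace-scanning while-loop by a single linear state-machine pass that keeps a depth counter and a start marker and emits a span the moment depth returns to zero.
import Mathlib
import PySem

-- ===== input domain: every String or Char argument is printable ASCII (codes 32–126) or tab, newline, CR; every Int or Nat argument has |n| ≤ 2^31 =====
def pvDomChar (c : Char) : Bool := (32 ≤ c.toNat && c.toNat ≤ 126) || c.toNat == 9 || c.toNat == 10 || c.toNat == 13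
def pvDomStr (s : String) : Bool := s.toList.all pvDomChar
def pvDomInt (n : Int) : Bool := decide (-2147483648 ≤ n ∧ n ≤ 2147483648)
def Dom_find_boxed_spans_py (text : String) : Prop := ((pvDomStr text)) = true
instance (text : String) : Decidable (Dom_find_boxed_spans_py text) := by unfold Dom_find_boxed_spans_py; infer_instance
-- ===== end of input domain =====

-- B replaces A's repeated text.find + nested brace-scanning loop by one linear state-machine
-- pass (depth counter + start marker); same O(n) cost, different decomposition (objective: alternative).

-- ===== PORT A =====

-- the token "\boxed{"
def pvTok : List Char := ['\\', 'b', 'o', 'x', 'e', 'd', '{']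

-- A's inner `while k < len(text) and depth > 0` loop, as structural recursion over the
-- suffix of the text starting at k; returns (end, suffix after the closing brace) when
-- depth reaches 0, none when the text runs out first (A's `depth != 0` break).
def pvScanA (s : List Char) (depth k : Nat) : Option (Nat × List Char) :=
  match s with
  | [] => none
  | c :: rest =>
    let d' := if c = '{' then depth + 1 else if c = '}' then depth - 1 else depth
    if d' = 0 then some (k, rest) else pvScanA rest d' (k + 1)

-- helper lemma used by pvOuterA's termination proof (stated here because the port cites it)
theorem pvScanA_spec : ∀ (s : List Char) (d k e : Nat) (r : List Char),
    pvScanA s d k = some (e, r) → k ≤ e ∧ e - k < s.length ∧ r = s.drop (e + 1 - k) := by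
  intro s
  induction s with
  | nil => intro d k e r h; simp [pvScanA] at h
  | cons c rest ih =>
    intro d k e r h
    simp only [pvScanA] at h
    by_cases hd : (if c = '{' then d + 1 else if c = '}' then d - 1 else d) = 0
    · rw [if_pos hd] at h
      obtain ⟨he, hr⟩ := Prod.mk.injEq .. ▸ (Option.some.injEq .. ▸ h)
      subst he; subst hr
      refine ⟨le_refl _, by simp, by simp⟩
    · rw [if_neg hd] at h
      obtain ⟨h1, h2, h3⟩ := ih _ _ _ _ h
      refine ⟨by omega, by simp; omega, ?_⟩
      rw [h3]
      have : e + 1 - k = (e - k) + 1 := by omega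
      rw [this, List.drop_succ_cons]
      congr 1
      omega

theorem pvQuirk (cs sub : List Char) (i : Nat) (h : cs.length < i) :
    PySem.Chars.findFrom cs sub (i : Int) none = -1 := by
  unfold PySem.Chars.findFrom
  simp only []
  split_ifs <;> omega

-- A's outer `while True` loop: find the next token occurrence (text.find(token, i) is
-- PySem.Chars.findFrom), run the inner brace scan, append the span, continue after the
-- closing brace.  A's locals start and j = start + len(token) are inlined
-- (j = findFrom(...).toNat + 7) so that the recursion's equation lemma stays usable.
def pvOuterA (cs : List Char) (i : Nat) (acc : List (Int × Int × String)) :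
    List (Int × Int × String) :=
  if hstart : PySem.Chars.findFrom cs pvTok (i : Int) none = -1 then acc
  else
    match hscan : pvScanA (cs.drop ((PySem.Chars.findFrom cs pvTok (i : Int) none).toNat + 7)) 1
        ((PySem.Chars.findFrom cs pvTok (i : Int) none).toNat + 7) with
    | none => acc
    | some (e, _) =>
        pvOuterA cs (e + 1)
          (acc ++ [((((PySem.Chars.findFrom cs pvTok (i : Int) none).toNat + 7 : Nat) : Int),
            (e : Int),
            String.ofList (PySem.List.slice cs
              (some (((PySem.Chars.findFrom cs pvTok (i : Int) none).toNat + 7 : Nat) : Int))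
              (some (e : Int))))])
termination_by cs.length + 1 - i
decreasing_by
  have hb := pvScanA_spec _ _ _ _ _ hscan
  by_cases hi : i ≤ cs.length
  · have hsp := PySem.Chars.findFrom_natCast_spec cs pvTok i hi hstart
    omega
  · exfalso; exact hstart (pvQuirk cs pvTok i (by omega))

def find_boxed_spans_py (text : String) : List (Int × Int × String) :=
  pvOuterA text.toList 0 []

-- ===== PORT B =====

-- B's single `while i < n` pass as structural recursion over the suffix at i; cs is the
-- full text (for the content slice text[start:i]); text.startswith(token, i) is
-- pvTok.isPrefixOf on the suffix at i.
def pvLoopB (cs : List Char) (s : List Char) (i depth start : Nat)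
    (acc : List (Int × Int × String)) : List (Int × Int × String) :=
  match s with
  | [] => acc
  | c :: rest =>
    if depth = 0 then
      if pvTok.isPrefixOf (c :: rest) then
        pvLoopB cs ((c :: rest).drop 7) (i + 7) 1 (i + 7) acc
      else
        pvLoopB cs rest (i + 1) 0 start acc
    else
      let d' := if c = '{' then depth + 1 else if c = '}' then depth - 1 else depth
      let acc' := if d' = 0 then
          acc ++ [((start : Int), (i : Int),
            String.ofList (PySem.List.slice cs (some (start : Int)) (some (i : Int))))]
        else acc
      pvLoopB cs rest (i + 1) d' start acc'
termination_by s.length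
decreasing_by all_goals simp

def find_boxed_spans_py_alt (text : String) : List (Int × Int × String) :=
  pvLoopB text.toList text.toList 0 0 0 []

-- ===== PRECONDITION & SPEC =====
def Spec_find_boxed_spans_py (text : String) (out : List (Int × Int × String)) : Prop := out = find_boxed_spans_py_alt text
instance (text : String) (out : List (Int × Int × String)) : Decidable (Spec_find_boxed_spans_py text out) := by unfold Spec_find_boxed_spans_py; infer_instance

-- ===== CLAIM (what is proved, stated in full; the proofs are below) =====
def Claim_equal_find_boxed_spans_py : Prop := ∀ (text : String), Dom_find_boxed_spans_py text → Spec_find_boxed_spans_py text (find_boxed_spans_py text)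

-- ===== LEMMAS AND PROOFS =====

-- inside a span (depth >= 1) B's pass is exactly A's inner brace scan
theorem pvSpan (cs : List Char) : ∀ (s : List Char) (d i st : Nat)
    (acc : List (Int × Int × String)), 1 ≤ d →
    pvLoopB cs s i d st acc =
      (match pvScanA s d i with
       | none => acc
       | some (e, r) =>
           pvLoopB cs r (e + 1) 0 st
             (acc ++ [((st : Int), (e : Int),
               String.ofList (PySem.List.slice cs (some (st : Int)) (some (e : Int))))])) := by
  intro s
  induction s with
  | nil => intro d i st acc hd; simp [pvLoopB, pvScanA]
  | cons c rest ih =>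
    intro d i st acc hd
    rw [pvLoopB, pvScanA]
    rw [if_neg (by omega : ¬ d = 0)]
    by_cases hd' : (if c = '{' then d + 1 else if c = '}' then d - 1 else d) = 0
    · simp only [hd']
      simp
    · simp only [if_neg hd']
      exact ih _ _ _ _ (by omega)

-- when the token occurs nowhere in the remaining text, B at depth 0 emits nothing
theorem pvNoTok (cs : List Char) : ∀ (s : List Char) (i st : Nat)
    (acc : List (Int × Int × String)), ¬ pvTok <:+: s →
    pvLoopB cs s i 0 st acc = acc := by
  intro s
  induction s with
  | nil => intro i st acc _; simp [pvLoopB]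
  | cons c rest ih =>
    intro i st acc h
    rw [pvLoopB, if_pos rfl, if_neg ?hpre]
    case hpre =>
      intro hp
      exact h (List.IsPrefix.isInfix (by exact List.isPrefixOf_iff_prefix.mp hp))
    exact ih _ _ _ (fun hin => h (hin.trans (List.suffix_cons c rest).isInfix))

-- one token-free step of B at depth 0
theorem pvStep (cs : List Char) : ∀ (n i st : Nat) (acc : List (Int × Int × String)) (p : Nat),
    p = i + n → (∀ m, i ≤ m → m < p → ¬ pvTok <+: cs.drop m) →
    pvLoopB cs (cs.drop i) i 0 st acc = pvLoopB cs (cs.drop p) p 0 st acc := by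
  intro n
  induction n with
  | zero => intro i st acc p hp _; subst hp; rfl
  | succ n ih =>
    intro i st acc p hp h
    cases hdi : cs.drop i with
    | nil =>
      have hlen : cs.length ≤ i := List.drop_eq_nil_iff.mp hdi
      have hp2 : cs.drop p = [] := List.drop_eq_nil_iff.mpr (by omega)
      rw [hp2]
      simp [pvLoopB]
    | cons c rest =>
      rw [pvLoopB, if_pos rfl, if_neg ?hpre]
      case hpre =>
        intro hpf
        have := h i le_rfl (by omega)
        rw [hdi] at this
        exact this (List.isPrefixOf_iff_prefix.mp hpf)
      have hrest : rest = cs.drop (i + 1) := by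
        have : cs.drop (i + 1) = (cs.drop i).drop 1 := by
          rw [List.drop_drop]
        rw [this, hdi]
        rfl
      rw [hrest]
      exact ih (i + 1) st acc p (by omega) (fun m h1 h2 => h m (by omega) h2)

-- B consumes the 7-character token in one step
theorem pvLoopB_token (cs t : List Char) (i st : Nat) (acc : List (Int × Int × String)) :
    pvLoopB cs (pvTok ++ t) i 0 st acc = pvLoopB cs t (i + 7) 1 (i + 7) acc := by
  show pvLoopB cs ('\\' :: 'b' :: 'o' :: 'x' :: 'e' :: 'd' :: '{' :: t) i 0 st acc = _
  rw [pvLoopB, if_pos rfl, if_pos ?hpre]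
  case hpre => simp [pvTok, List.isPrefixOf]
  rfl

-- main loop correspondence
theorem pvMain (cs : List Char) : ∀ (n i : Nat), cs.length - i = n → i ≤ cs.length →
    ∀ (st : Nat) (acc : List (Int × Int × String)),
    pvLoopB cs (cs.drop i) i 0 st acc = pvOuterA cs i acc := by
  intro n
  induction n using Nat.strong_induction_on with
  | _ n IH =>
    intro i hn hi st acc
    rw [pvOuterA]
    by_cases hf : PySem.Chars.findFrom cs pvTok (i : Int) none = -1
    · rw [dif_pos hf]
      exact pvNoTok cs _ i st acc
        ((PySem.Chars.findFrom_natCast_eq_neg_one_iff cs pvTok i hi).mp hf)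
    · rw [dif_neg hf]
      obtain ⟨hk, hpre, hmin⟩ := PySem.Chars.findFrom_natCast_spec cs pvTok i hi hf
      set p := (PySem.Chars.findFrom cs pvTok (i : Int) none).toNat with hpdef
      have hip : i ≤ p := by omega
      rw [pvStep cs (p - i) i st acc p (by omega) (fun m h1 h2 => hmin m h1 h2)]
      obtain ⟨t, ht⟩ := hpre
      have hdt : cs.drop (p + 7) = t := by
        have h77 : cs.drop (p + 7) = (cs.drop p).drop 7 := by
          rw [List.drop_drop, Nat.add_comm]
        rw [h77, ← ht]
        simp [pvTok]
      rw [← ht, pvLoopB_token, ← hdt]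
      rw [pvSpan cs (cs.drop (p + 7)) 1 (p + 7) (p + 7) acc le_rfl]
      rcases hsc : pvScanA (cs.drop (p + 7)) 1 (p + 7) with _ | ⟨e, r⟩
      · rfl
      · obtain ⟨h1, h2, h3⟩ := pvScanA_spec _ _ _ _ _ hsc
        have hlen : (cs.drop (p + 7)).length = cs.length - (p + 7) := by
          simp
        have he1 : e + 1 ≤ cs.length := by omega
        have hr : r = cs.drop (e + 1) := by
          rw [h3, List.drop_drop]
          congr 1
          omega
        rw [hr]
        exact IH (cs.length - (e + 1)) (by omega) (e + 1) rfl he1 (p + 7)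
          (acc ++ [((↑(p + 7) : Int), (e : Int),
            String.ofList (PySem.List.slice cs (some (↑(p + 7) : Int)) (some (e : Int))))])

-- ===== VERDICT (by name: the statement is the Claim_ definition above) =====
theorem find_boxed_spans_py_spec : Claim_equal_find_boxed_spans_py := by
  intro text _
  unfold Spec_find_boxed_spans_py find_boxed_spans_py find_boxed_spans_py_alt
  have h := pvMain text.toList (text.toList.length - 0) 0 rfl (Nat.zero_le _) 0 []
  simpa using h.symm
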